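-- pv_equiv track=rewrite | github.com/vai-tv/Wordle-Bot | bot/auto.py | letters_colours_to_gxy
-- ===== SOURCE A (Python) =====
-- def letters_colours_to_gxy(grid, colours) -> tuple[list[tuple[str, int]], list[tuple[str, int]], list[tuple[str, int]]]:
--     """
--     Converts grid letters and their corresponding colours to a tuple of lists of tuples.
--     Each tuple is (letter, pos) where pos is indexed from 0.
--     """
--
--     green = []
--     yellow = []
--     gray = []
--
--     for row_idx, row in enumerate(grid):
--         for col_idx, letter in enumerate(row):
--             letter = letter.lower()
--             colour = colours[row_idx][col_idx]
--             if colour == 'green':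
--                 green.append((letter, col_idx))
--             elif colour == 'yellow':
--                 yellow.append((letter, col_idx))
--             else:
--                 gray.append((letter, col_idx))
--
--     return (green, yellow, gray)
-- ===== SOURCE B (Python) =====
-- def letters_colours_to_gxy(grid, colours) -> tuple[list[tuple[str, int]], list[tuple[str, int]], list[tuple[str, int]]]:
--     cells = [(letter.lower(), col_idx, colours[row_idx][col_idx])
--              for row_idx, row in enumerate(grid)
--              for col_idx, letter in enumerate(row)]
--     green = [(l, c) for l, c, col in cells if col == 'green']
--     yellow = [(l, c) for l, c, col in cells if col == 'yellow']
--     gray = [(l, c) for l, c, col in cells if col not in ('green', 'yellow')]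
--     return (green, yellow, gray)
-- ===== Notes on version B (the rewrite author's own statement) =====
-- stated objective: alternative
-- what changed: Replaces the single nested loop that appends into three accumulators via an if/elif/else chain by first materialising a flat cell list (letter, col, colour) and then building each of the three outputs by its own filtered comprehension over that list.
import Mathlib
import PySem

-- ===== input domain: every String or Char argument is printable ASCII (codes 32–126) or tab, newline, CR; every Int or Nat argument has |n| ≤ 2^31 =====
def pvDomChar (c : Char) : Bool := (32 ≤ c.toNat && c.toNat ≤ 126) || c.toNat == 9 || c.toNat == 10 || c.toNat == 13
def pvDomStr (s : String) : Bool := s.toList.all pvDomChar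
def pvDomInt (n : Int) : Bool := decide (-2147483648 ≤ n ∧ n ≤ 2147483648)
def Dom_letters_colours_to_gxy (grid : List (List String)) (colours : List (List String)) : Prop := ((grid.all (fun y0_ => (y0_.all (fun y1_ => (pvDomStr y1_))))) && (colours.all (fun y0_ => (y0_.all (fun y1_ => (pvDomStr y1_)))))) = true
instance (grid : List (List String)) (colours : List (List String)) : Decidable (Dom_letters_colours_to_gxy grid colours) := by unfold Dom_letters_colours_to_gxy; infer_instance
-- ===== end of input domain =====

-- B builds a flat (letter, col, colour) cell list once and derives each of the three
-- outputs by its own filtered pass, instead of A's single nested loop with a three-way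
-- branch appending into three accumulators (objective: alternative decomposition).


-- ===== PORT A =====
-- literal port of A: one nested loop, three-way branch, appending into (green, yellow, gray)
def letters_colours_to_gxy (grid : List (List String)) (colours : List (List String)) : (List (String × Int)) × (List (String × Int)) × (List (String × Int)) :=
  let st :=
    (PySem.List.enumerate grid).foldl (fun st p =>
      let row_idx := p.1
      let row := p.2
      (PySem.List.enumerate row).foldl (fun st q =>
        let col_idx := q.1
        let letter := PySem.Str.lower q.2
        -- colours[row_idx][col_idx]; out-of-range raises in Python (excluded by Pre_), getD is a placeholder
        let colour := (PySem.List.pyGet? ((PySem.List.pyGet? colours row_idx).getD []) col_idx).getD ""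
        if colour == "green" then (st.1 ++ [(letter, col_idx)], st.2.1, st.2.2)
        else if colour == "yellow" then (st.1, st.2.1 ++ [(letter, col_idx)], st.2.2)
        else (st.1, st.2.1, st.2.2 ++ [(letter, col_idx)])) st) (([], [], []) : (List (String × Int)) × (List (String × Int)) × (List (String × Int)))
  (st.1, st.2.1, st.2.2)

-- ===== PORT B =====
-- literal port of B: build the flat cell list, then three filtered passes
def pvCells (grid : List (List String)) (colours : List (List String)) : List (String × Int × String) :=
  (PySem.List.enumerate grid).flatMap (fun p =>
    (PySem.List.enumerate p.2).map (fun q =>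
      (PySem.Str.lower q.2, q.1, (PySem.List.pyGet? ((PySem.List.pyGet? colours p.1).getD []) q.1).getD "")))

def letters_colours_to_gxy_alt (grid : List (List String)) (colours : List (List String)) : (List (String × Int)) × (List (String × Int)) × (List (String × Int)) :=
  let cells := pvCells grid colours
  let green := (cells.filter (fun t => t.2.2 == "green")).map (fun t => (t.1, t.2.1))
  let yellow := (cells.filter (fun t => t.2.2 == "yellow")).map (fun t => (t.1, t.2.1))
  let gray := (cells.filter (fun t => !(t.2.2 == "green" || t.2.2 == "yellow"))).map (fun t => (t.1, t.2.1))
  (green, yellow, gray)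

-- ===== PRECONDITION & SPEC =====
-- Pre_ excludes exactly the shape mismatches on which A raises IndexError
-- (colours has fewer rows than grid, or some colours row shorter than its grid row).
def Pre_letters_colours_to_gxy (grid : List (List String)) (colours : List (List String)) : Prop :=
  grid.length ≤ colours.length ∧ ∀ p ∈ grid.zip colours, p.1.length ≤ p.2.length
instance (grid : List (List String)) (colours : List (List String)) : Decidable (Pre_letters_colours_to_gxy grid colours) := by unfold Pre_letters_colours_to_gxy; infer_instance

def pvWitness_letters_colours_to_gxy : List (List String) × List (List String) :=
  ([["A", "B"], ["C"]], [["green", "yellow"], ["gray"]])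

def Spec_letters_colours_to_gxy (grid : List (List String)) (colours : List (List String)) (out : (List (String × Int)) × (List (String × Int)) × (List (String × Int))) : Prop := out = letters_colours_to_gxy_alt grid colours
instance (grid : List (List String)) (colours : List (List String)) (out : (List (String × Int)) × (List (String × Int)) × (List (String × Int))) : Decidable (Spec_letters_colours_to_gxy grid colours out) := by unfold Spec_letters_colours_to_gxy; infer_instance

-- ===== CLAIM (what is proved, stated in full; the proofs are below) =====
def Claim_equal_letters_colours_to_gxy : Prop := ∀ (grid : List (List String)) (colours : List (List String)), Dom_letters_colours_to_gxy grid colours → Pre_letters_colours_to_gxy grid colours → Spec_letters_colours_to_gxy grid colours (letters_colours_to_gxy grid colours)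

-- ===== LEMMAS AND PROOFS =====

-- A's classifying step, over a precomputed cell
def pvStep (st : (List (String × Int)) × (List (String × Int)) × (List (String × Int))) (t : String × Int × String) : (List (String × Int)) × (List (String × Int)) × (List (String × Int)) :=
  if t.2.2 == "green" then (st.1 ++ [(t.1, t.2.1)], st.2.1, st.2.2)
  else if t.2.2 == "yellow" then (st.1, st.2.1 ++ [(t.1, t.2.1)], st.2.2)
  else (st.1, st.2.1, st.2.2 ++ [(t.1, t.2.1)])

theorem foldl_flatMap' {α β γ : Type} (f : γ → β → γ) (g : α → List β) (l : List α) (init : γ) :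
    (l.flatMap g).foldl f init = l.foldl (fun st x => (g x).foldl f st) init := by
  induction l generalizing init with
  | nil => rfl
  | cons a l ih => simp [List.flatMap_cons, List.foldl_append, ih]

theorem foldl_step_eq (cells : List (String × Int × String)) (g y r : List (String × Int)) :
    cells.foldl pvStep (g, y, r) =
      (g ++ (cells.filter (fun t => t.2.2 == "green")).map (fun t => (t.1, t.2.1)),
       y ++ (cells.filter (fun t => t.2.2 == "yellow")).map (fun t => (t.1, t.2.1)),
       r ++ (cells.filter (fun t => !(t.2.2 == "green" || t.2.2 == "yellow"))).map (fun t => (t.1, t.2.1))) := by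
  induction cells generalizing g y r with
  | nil => simp
  | cons c l ih =>
    simp only [List.foldl_cons, pvStep]
    by_cases hg : c.2.2 = "green"
    · simp [hg, ih]
    · by_cases hy : c.2.2 = "yellow"
      · simp [hy, ih]
      · simp [hg, hy, ih]

theorem portA_eq_fold_cells (grid colours : List (List String)) :
    letters_colours_to_gxy grid colours = (pvCells grid colours).foldl pvStep ([], [], []) := by
  unfold letters_colours_to_gxy pvCells
  rw [foldl_flatMap']
  exact congrArg (fun f => List.foldl f (([], [], []) : (List (String × Int)) × (List (String × Int)) × (List (String × Int))) (PySem.List.enumerate grid))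
    (funext fun st => funext fun p => by rw [List.foldl_map]; rfl)

-- ===== VERDICT (by name: the statement is the Claim_ definition above) =====
theorem letters_colours_to_gxy_spec : Claim_equal_letters_colours_to_gxy := by
  intro grid colours _ _
  unfold Spec_letters_colours_to_gxy letters_colours_to_gxy_alt
  rw [portA_eq_fold_cells, foldl_step_eq]
  simp
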